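-- pv_equiv track=rewrite | github.com/Arsen1302/Code-copy-detector | TestData/solutions/problem_1514_4.py | solution_1514_4
-- ===== SOURCE A (Python) =====
-- from typing import List
--
-- def solution_1514_4(nums: List[int], key: int, k: int) -> List[int]:
--     ans = []
--     ii = 0
--     for i, x in enumerate(nums):
--         if x == key:
--             lo, hi = max(ii, i-k), min(i+k+1, len(nums))
--             ans.extend(list(range(lo, hi)))
--             ii = hi
--     return ans
-- ===== SOURCE B (Python) =====
-- def solution_1514_4(nums, key, k):
--     n = len(nums)
--     inf = abs(k) + n + 1  # exceeds any acceptable distance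
--     left = []             # left[i] = distance to nearest key occurrence at or before i
--     d = inf
--     for x in nums:
--         d = 0 if x == key else d + 1
--         left.append(d)
--     right = []            # right[i] = distance to nearest key occurrence at or after i
--     d = inf
--     for x in reversed(nums):
--         d = 0 if x == key else d + 1
--         right.append(d)
--     right.reverse()
--     return [i for i in range(n) if left[i] <= k or right[i] <= k]
-- ===== Notes on version B (the rewrite author's own statement) =====
-- stated objective: alternative
-- what changed: Replaces A's single stateful pass (watermark ii deduplicating extended index ranges) by two nearest-occurrence distance sweeps (left-to-right and right-to-left) followed by a filter keeping indices whose distance to some key occurrence is at most k.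
import Mathlib
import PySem

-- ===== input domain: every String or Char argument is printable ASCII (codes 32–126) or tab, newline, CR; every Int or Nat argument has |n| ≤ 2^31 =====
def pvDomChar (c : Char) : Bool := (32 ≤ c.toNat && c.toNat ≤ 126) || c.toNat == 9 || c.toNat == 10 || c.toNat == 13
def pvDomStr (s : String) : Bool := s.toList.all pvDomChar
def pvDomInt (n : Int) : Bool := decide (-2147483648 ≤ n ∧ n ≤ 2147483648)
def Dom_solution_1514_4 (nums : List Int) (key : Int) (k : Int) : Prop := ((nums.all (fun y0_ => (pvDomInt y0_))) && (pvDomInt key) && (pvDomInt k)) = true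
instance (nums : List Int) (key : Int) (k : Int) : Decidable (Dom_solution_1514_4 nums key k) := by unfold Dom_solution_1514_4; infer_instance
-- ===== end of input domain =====

-- B replaces A's stateful watermark pass by two nearest-occurrence distance sweeps plus a filter; objective: alternative.

-- ===== PORT A =====
def solution_1514_4 (nums : List Int) (key : Int) (k : Int) : List Int :=
  ((PySem.List.enumerate nums 0).foldl
    (fun (st : List Int × Int) (p : Int × Int) =>
      if p.2 == key then
        (st.1 ++ PySem.List.pyRange (max st.2 (p.1 - k)) (min (p.1 + k + 1) (nums.length : Int)) 1,
         min (p.1 + k + 1) (nums.length : Int))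
      else st)
    ([], 0)).1

-- ===== PORT B =====
-- left/right are built by the two append-loops of Source B; the final comprehension indexes them with
-- i from range(n), always in range, so Python's left[i] is ported as pyGetD left i 0 (exact there).
def solution_1514_4_alt (nums : List Int) (key : Int) (k : Int) : List Int :=
  let n : Int := (nums.length : Int)
  let inf : Int := |k| + n + 1
  let left := (nums.foldl
    (fun (st : List Int × Int) x =>
      let d := if x == key then 0 else st.2 + 1
      (st.1 ++ [d], d)) ([], inf)).1
  let right := ((nums.reverse.foldl
    (fun (st : List Int × Int) x =>
      let d := if x == key then 0 else st.2 + 1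
      (st.1 ++ [d], d)) ([], inf)).1).reverse
  (PySem.List.pyRange 0 n 1).filter
    (fun i => decide (PySem.List.pyGetD left i 0 ≤ k) || decide (PySem.List.pyGetD right i 0 ≤ k))

-- ===== PRECONDITION & SPEC =====
def Spec_solution_1514_4 (nums : List Int) (key : Int) (k : Int) (out : List Int) : Prop := out = solution_1514_4_alt nums key k
instance (nums : List Int) (key : Int) (k : Int) (out : List Int) : Decidable (Spec_solution_1514_4 nums key k out) := by unfold Spec_solution_1514_4; infer_instance

-- ===== CLAIM (what is proved, stated in full; the proofs are below) =====
def Claim_equal_solution_1514_4 : Prop := ∀ (nums : List Int) (key : Int) (k : Int), Dom_solution_1514_4 nums key k → Spec_solution_1514_4 nums key k (solution_1514_4 nums key k)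

-- ===== LEMMAS AND PROOFS =====

-- "covered": index j is within k of some occurrence of key among the (index, value) pairs l
def pvCov (key k : Int) (l : List (Int × Int)) (j : Int) : Bool :=
  l.any (fun p => p.2 == key && (decide (p.1 - k ≤ j) && decide (j ≤ p.1 + k)))

-- the indices A emits while folding the remaining pairs l from watermark ii
def pvEmit (key k n : Int) : List (Int × Int) → Int → List Int
  | [], _ => []
  | p :: l, ii =>
    if p.2 == key then
      PySem.List.pyRange (max ii (p.1 - k)) (min (p.1 + k + 1) n) 1 ++
        pvEmit key k n l (min (p.1 + k + 1) n)
    else pvEmit key k n l ii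

-- the distance list B's append-loop builds, as a structural scan
def pvLD (key : Int) : List Int → Int → List Int
  | [], _ => []
  | x :: xs, d =>
    (if x == key then 0 else d + 1) :: pvLD key xs (if x == key then 0 else d + 1)

theorem pvFold_eq_emit (nums : List Int) (key k : Int) :
    ∀ (l : List (Int × Int)) (ans : List Int) (ii : Int),
      (l.foldl
        (fun (st : List Int × Int) (p : Int × Int) =>
          if p.2 == key then
            (st.1 ++ PySem.List.pyRange (max st.2 (p.1 - k)) (min (p.1 + k + 1) (nums.length : Int)) 1,
             min (p.1 + k + 1) (nums.length : Int))
          else st)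
        (ans, ii)).1
      = ans ++ pvEmit key k (nums.length : Int) l ii := by
  intro l
  induction l with
  | nil => intro ans ii; simp [pvEmit]
  | cons p l ih =>
    intro ans ii
    by_cases hp : p.2 == key
    · simp only [List.foldl_cons, hp, if_pos, pvEmit, ih, List.append_assoc]
    · simp only [List.foldl_cons, hp, pvEmit, ih]
      simp

theorem pvEmit_nil_of_neg (key k n : Int) (hk : k < 0) :
    ∀ (l : List (Int × Int)) (ii : Int), pvEmit key k n l ii = [] := by
  intro l
  induction l with
  | nil => intro ii; simp [pvEmit]
  | cons p l ih =>
    intro ii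
    have h : min (p.1 + k + 1) n ≤ max ii (p.1 - k) := by omega
    by_cases hp : p.2 == key
    · simp [pvEmit, hp, PySem.List.pyRange_one_eq_nil h, ih]
    · simp [pvEmit, hp, ih]

theorem pvEmit_eq_filter (key k n : Int) (hk : 0 ≤ k) :
    ∀ (l : List (Int × Int)) (ii : Int),
      l.Pairwise (fun p q => p.1 < q.1) →
      ii ≤ n →
      (∀ p ∈ l, ii ≤ p.1 + k + 1) →
      (∀ p ∈ l, 0 ≤ p.1 ∧ p.1 < n) →
      pvEmit key k n l ii = (PySem.List.pyRange ii n 1).filter (pvCov key k l) := by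
  intro l
  induction l with
  | nil =>
    intro ii _ _ _ _
    simp [pvEmit, pvCov]
  | cons p l ih =>
    intro ii hpw hiin hii hbnd
    have hpl : ∀ q ∈ l, p.1 < q.1 := (List.pairwise_cons.mp hpw).1
    have hpw' : l.Pairwise (fun p q => p.1 < q.1) := (List.pairwise_cons.mp hpw).2
    have hpbnd : 0 ≤ p.1 ∧ p.1 < n := hbnd p (List.mem_cons_self ..)
    have hiip : ii ≤ p.1 + k + 1 := hii p (List.mem_cons_self ..)
    by_cases hp : p.2 == key
    · -- key occurrence at index p.1
      set lo := max ii (p.1 - k) with hlo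
      set hi := min (p.1 + k + 1) n with hhi
      have h1 : ii ≤ lo := le_max_left _ _
      have h2 : lo ≤ hi := by omega
      have h3 : hi ≤ n := min_le_right _ _
      have hsplit : PySem.List.pyRange ii n 1
          = PySem.List.pyRange ii lo 1 ++ PySem.List.pyRange lo hi 1 ++ PySem.List.pyRange hi n 1 := by
        rw [PySem.List.pyRange_one_append ii lo n h1 (by omega),
            PySem.List.pyRange_one_append lo hi n h2 h3, List.append_assoc]
      have hcons : ∀ j, pvCov key k (p :: l) j
          = ((p.2 == key && (decide (p.1 - k ≤ j) && decide (j ≤ p.1 + k))) || pvCov key k l j) := by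
        intro j; simp [pvCov]
      -- low part: nothing covered
      have hlow : (PySem.List.pyRange ii lo 1).filter (pvCov key k (p :: l)) = [] := by
        rw [List.filter_eq_nil_iff]
        intro j hj
        rw [PySem.List.mem_pyRange_one] at hj
        rw [hcons]
        simp only [Bool.or_eq_true, Bool.and_eq_true, decide_eq_true_eq, pvCov, List.any_eq_true,
          not_or]
        constructor
        · rintro ⟨-, h4, h5⟩; omega
        · rintro ⟨q, hq, -, h4, h5⟩
          have := hpl q hq; omega
      -- middle part: everything covered by p
      have hmid : (PySem.List.pyRange lo hi 1).filter (pvCov key k (p :: l)) = PySem.List.pyRange lo hi 1 := by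
        rw [List.filter_eq_self]
        intro j hj
        rw [PySem.List.mem_pyRange_one] at hj
        rw [hcons]
        simp only [Bool.or_eq_true, Bool.and_eq_true, decide_eq_true_eq]
        exact Or.inl ⟨hp, by omega, by omega⟩
      -- high part: p covers nothing there
      have hhigh : (PySem.List.pyRange hi n 1).filter (pvCov key k (p :: l))
          = (PySem.List.pyRange hi n 1).filter (pvCov key k l) := by
        apply List.filter_congr
        intro j hj
        rw [PySem.List.mem_pyRange_one] at hj
        rw [hcons]
        have : ¬ (decide (p.1 - k ≤ j) && decide (j ≤ p.1 + k)) = true := by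
          simp only [Bool.and_eq_true, decide_eq_true_eq]; omega
        cases hb : (decide (p.1 - k ≤ j) && decide (j ≤ p.1 + k)) with
        | false => simp
        | true => exact absurd hb this
      have hihres := ih hi hpw' (by omega)
        (fun q hq => by have := hpl q hq; omega)
        (fun q hq => hbnd q (List.mem_cons_of_mem _ hq))
      simp only [pvEmit, hp, if_pos, ← hlo, ← hhi, hihres]
      rw [hsplit, List.filter_append, List.filter_append, hlow, hmid, hhigh]
      simp
    · -- non-key element: head never matches
      have hcov : ∀ j, pvCov key k (p :: l) j = pvCov key k l j := by
        intro j; simp [pvCov, hp]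
      have hihres := ih ii hpw' hiin
        (fun q hq => hii q (List.mem_cons_of_mem _ hq))
        (fun q hq => hbnd q (List.mem_cons_of_mem _ hq))
      simp only [pvEmit, hp, hihres]
      exact (List.filter_congr (fun j _ => (hcov j).symm))

theorem pvEnum_bounds (nums : List Int) :
    ∀ p ∈ PySem.List.enumerate nums 0, 0 ≤ p.1 ∧ p.1 < (nums.length : Int) := by
  intro p hp
  rw [PySem.List.mem_enumerate_iff] at hp
  obtain ⟨m, hm, rfl⟩ := hp
  constructor <;> simp <;> exact_mod_cast hm

-- A's result, characterised: the covered indices of [0, n), in order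
theorem pvA_eq_filter (nums : List Int) (key k : Int) :
    solution_1514_4 nums key k
      = (PySem.List.pyRange 0 (nums.length : Int) 1).filter
          (pvCov key k (PySem.List.enumerate nums 0)) := by
  unfold solution_1514_4
  rw [pvFold_eq_emit, List.nil_append]
  by_cases hk : 0 ≤ k
  · exact pvEmit_eq_filter key k _ hk (PySem.List.enumerate nums 0) 0
      (PySem.List.pairwise_lt_enumerate nums 0)
      (by positivity)
      (fun p hp => by have := pvEnum_bounds nums p hp; omega)
      (pvEnum_bounds nums)
  · rw [pvEmit_nil_of_neg key k _ (by omega)]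
    symm
    rw [List.filter_eq_nil_iff]
    intro j _
    simp only [pvCov, List.any_eq_true, Bool.and_eq_true, decide_eq_true_eq, not_exists, not_and]
    intro p _ _ h1 h2
    omega

-- ===== B-side lemmas =====

theorem pvScan_eq (key : Int) :
    ∀ (xs : List Int) (acc : List Int) (d : Int),
      (xs.foldl
        (fun (st : List Int × Int) x =>
          let d' := if x == key then 0 else st.2 + 1
          (st.1 ++ [d'], d')) (acc, d)).1 = acc ++ pvLD key xs d := by
  intro xs
  induction xs with
  | nil => intro acc d; simp [pvLD]
  | cons x xs ih =>
    intro acc d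
    simp only [List.foldl_cons, pvLD, ih, List.append_assoc, List.singleton_append]

theorem pvLD_length (key : Int) :
    ∀ (xs : List Int) (d : Int), (pvLD key xs d).length = xs.length := by
  intro xs
  induction xs with
  | nil => intro d; simp [pvLD]
  | cons x xs ih => intro d; simp [pvLD, ih]

-- characterisation of the scan: entry j is ≤ k iff some occurrence at i ≤ j is within k,
-- or (no occurrence up to j and the seed distance d reaches ≤ k)
theorem pvLD_le_iff (key k : Int) :
    ∀ (xs : List Int) (d : Int) (j : Nat) (v : Int),
      (pvLD key xs d)[j]? = some v →
      (v ≤ k ↔ (∃ i : Nat, i ≤ j ∧ xs[i]? = some key ∧ (j : Int) - i ≤ k)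
             ∨ (d + j + 1 ≤ k ∧ ¬ ∃ i : Nat, i ≤ j ∧ xs[i]? = some key)) := by
  intro xs
  induction xs with
  | nil => intro d j v hv; simp [pvLD] at hv
  | cons x xs ih =>
    intro d j v hv
    by_cases hx : x == key
    · -- head is an occurrence: distance resets to 0
      have hxk : x = key := by simpa using hx
      cases j with
      | zero =>
        simp only [pvLD, hx, if_pos, List.getElem?_cons_zero, Option.some.injEq] at hv
        subst hv
        constructor
        · intro h0
          exact Or.inl ⟨0, le_refl 0, by simp [hxk], by push_cast; omega⟩
        · rintro (⟨i, hij, hkey, hd⟩ | ⟨-, hno⟩)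
          · omega
          · exact absurd ⟨0, le_refl 0, by simp [hxk]⟩ hno
      | succ j =>
        simp only [pvLD, hx, if_pos, List.getElem?_cons_succ] at hv
        rw [ih 0 j v hv]
        constructor
        · rintro (⟨i, hij, hkey, hd⟩ | ⟨hd, -⟩)
          · exact Or.inl ⟨i + 1, by omega, by simpa using hkey, by push_cast at hd ⊢; omega⟩
          · exact Or.inl ⟨0, by omega, by simp [hxk], by push_cast at hd ⊢; omega⟩
        · rintro (⟨i, hij, hkey, hd⟩ | ⟨-, hno⟩)
          · cases i with
            | zero =>
              -- the head occurrence gives j+1 ≤ k, so every index up to j is within k of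
              -- an occurrence in xs if any exists; otherwise the no-occurrence disjunct holds
              by_cases hocc : ∃ i' : Nat, i' ≤ j ∧ xs[i']? = some key
              · obtain ⟨i', hij', hk'⟩ := hocc
                exact Or.inl ⟨i', hij', hk', by push_cast at hd ⊢; omega⟩
              · exact Or.inr ⟨by push_cast at hd ⊢; omega, hocc⟩
            | succ i =>
              exact Or.inl ⟨i, by omega, by simpa using hkey, by push_cast at hd ⊢; omega⟩
          · exact absurd ⟨0, by omega, by simp [hxk]⟩ hno
    · -- head is not an occurrence: distance grows by one
      rw [Bool.not_eq_true] at hx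
      have hxk : ¬ x = key := by simpa using hx
      cases j with
      | zero =>
        simp only [pvLD, hx, Bool.false_eq_true, if_false, List.getElem?_cons_zero,
          Option.some.injEq] at hv
        subst hv
        constructor
        · intro h0
          refine Or.inr ⟨by push_cast; omega, ?_⟩
          rintro ⟨i, hij, hkey⟩
          interval_cases i
          exact hxk (by simpa using hkey)
        · rintro (⟨i, hij, hkey, hd⟩ | ⟨hd, -⟩)
          · interval_cases i
            exact absurd (by simpa using hkey) hxk
          · push_cast at hd; omega
      | succ j =>
        simp only [pvLD, hx, Bool.false_eq_true, if_false, List.getElem?_cons_succ] at hv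
        rw [ih (d + 1) j v hv]
        constructor
        · rintro (⟨i, hij, hkey, hd⟩ | ⟨hd, hno⟩)
          · exact Or.inl ⟨i + 1, by omega, by simpa using hkey, by push_cast at hd ⊢; omega⟩
          · refine Or.inr ⟨by push_cast at hd ⊢; omega, ?_⟩
            rintro ⟨i, hij, hkey⟩
            cases i with
            | zero => exact hxk (by simpa using hkey)
            | succ i => exact hno ⟨i, by omega, by simpa using hkey⟩
        · rintro (⟨i, hij, hkey, hd⟩ | ⟨hd, hno⟩)
          · cases i with
            | zero => exact absurd (by simpa using hkey) hxk
            | succ i =>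
              exact Or.inl ⟨i, by omega, by simpa using hkey, by push_cast at hd ⊢; omega⟩
          · refine Or.inr ⟨by push_cast at hd ⊢; omega, ?_⟩
            rintro ⟨i, hij, hkey⟩
            exact hno ⟨i + 1, by omega, by simpa using hkey⟩

-- membership form of pvCov over enumerate
theorem pvCov_iff (nums : List Int) (key k j : Int) :
    pvCov key k (PySem.List.enumerate nums 0) j = true
      ↔ ∃ m : Nat, nums[m]? = some key ∧ (m : Int) - k ≤ j ∧ j ≤ (m : Int) + k := by
  simp only [pvCov, List.any_eq_true, Bool.and_eq_true, decide_eq_true_eq, beq_iff_eq,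
    PySem.List.mem_enumerate_iff]
  constructor
  · rintro ⟨p, ⟨m, hm, rfl⟩, h1, h2, h3⟩
    simp only [zero_add] at h1 h2 h3
    exact ⟨m, by rw [List.getElem?_eq_getElem hm, h1], h2, h3⟩
  · rintro ⟨m, h1, h2, h3⟩
    obtain ⟨hm, h1⟩ := List.getElem?_eq_some_iff.mp h1
    exact ⟨((m : Int), nums[m]), ⟨m, hm, by simp⟩, h1, by simpa using h2, by simpa using h3⟩

-- ===== VERDICT (by name: the statement is the Claim_ definition above) =====
theorem solution_1514_4_spec : Claim_equal_solution_1514_4 := by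
  unfold Claim_equal_solution_1514_4
  intro nums key k _
  unfold Spec_solution_1514_4
  rw [pvA_eq_filter]
  simp only [solution_1514_4_alt]
  rw [pvScan_eq, pvScan_eq, List.nil_append, List.nil_append]
  apply List.filter_congr
  intro j hj
  rw [PySem.List.mem_pyRange_one] at hj
  obtain ⟨hj0, hjn⟩ := hj
  -- j is a genuine index: write j = (jn : Int) with jn < nums.length
  obtain ⟨jn, rfl⟩ : ∃ jn : Nat, j = (jn : Int) := ⟨j.toNat, by omega⟩
  have hjn' : jn < nums.length := by exact_mod_cast hjn
  have habs : k ≤ |k| := le_abs_self k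
  set inf : Int := |k| + (nums.length : Int) + 1 with hinf
  have hLlen : (pvLD key nums inf).length = nums.length := pvLD_length key nums inf
  have hRlen : (pvLD key nums.reverse inf).length = nums.length := by
    rw [pvLD_length, List.length_reverse]
  -- left lookup
  have hLget : PySem.List.pyGetD (pvLD key nums inf) (jn : Int) 0
      = (pvLD key nums inf)[jn]'(by omega) := by
    rw [PySem.List.pyGetD_natCast]
    exact List.getD_eq_getElem _ _ (by omega)
  -- right lookup (reverse of the scan of nums.reverse)
  have hRget : PySem.List.pyGetD ((pvLD key nums.reverse inf).reverse) (jn : Int) 0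
      = (pvLD key nums.reverse inf)[nums.length - 1 - jn]'(by omega) := by
    rw [PySem.List.pyGetD_natCast]
    rw [List.getD_eq_getElem _ _ (by rw [List.length_reverse, hRlen]; omega)]
    rw [List.getElem_reverse]
    simp only [hRlen]
  have hLiff := pvLD_le_iff key k nums inf jn ((pvLD key nums inf)[jn]'(by omega))
    (by rw [List.getElem?_eq_getElem])
  have hRiff := pvLD_le_iff key k nums.reverse inf (nums.length - 1 - jn)
    ((pvLD key nums.reverse inf)[nums.length - 1 - jn]'(by omega))
    (by rw [List.getElem?_eq_getElem])
  -- both sides as propositions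
  rw [Bool.eq_iff_iff]
  simp only [Bool.or_eq_true, decide_eq_true_eq]
  rw [pvCov_iff, hLget, hRget, hLiff, hRiff]
  constructor
  · rintro ⟨m, hkey, h1, h2⟩
    obtain ⟨hm, -⟩ := List.getElem?_eq_some_iff.mp hkey
    by_cases hmj : m ≤ jn
    · exact Or.inl (Or.inl ⟨m, hmj, hkey, by omega⟩)
    · refine Or.inr (Or.inl ⟨nums.length - 1 - m, by omega, ?_, by push_cast; omega⟩)
      rw [List.getElem?_reverse (by omega)]
      have hidx : nums.length - 1 - (nums.length - 1 - m) = m := by omega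
      rw [hidx]
      exact hkey
  · rintro ((⟨i, hij, hkey, hd⟩ | ⟨hd, -⟩) | (⟨i, hij, hkey, hd⟩ | ⟨hd, -⟩))
    · exact ⟨i, hkey, by omega, by omega⟩
    · exfalso; push_cast at hd; omega
    · have hi : i < nums.length := by
        have := (List.getElem?_eq_some_iff.mp hkey).1
        simpa using this
      rw [List.getElem?_reverse hi] at hkey
      refine ⟨nums.length - 1 - i, by simpa using hkey,
        by push_cast at hd ⊢; omega, by push_cast at hd ⊢; omega⟩
    · exfalso; push_cast at hd; omega
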